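-- pv_equiv track=rewrite | github.com/fivedollarfridays/credit-assessment | src/modules/credit/agents/gray.py | _notice_matches
-- ===== SOURCE A (Python) =====
-- _SCORE_KEYWORDS = ("credit score", "score disclosure", "score used")
--
-- def _notice_matches(required: str, received_set: set[str]) -> bool:
--     """Check if a required notice is satisfied by any received notice."""
--     for received in received_set:
--         if required == received:
--             return True
--         # Handle score-related keywords for FCRA 609(f)
--         if any(kw in required for kw in _SCORE_KEYWORDS):
--             if any(kw in received for kw in _SCORE_KEYWORDS):
--                 return True
--     return False
-- ===== SOURCE B (Python) =====
-- _SCORE_KEYWORDS = ("credit score", "score disclosure", "score used")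
--
-- _SCORE_TOKEN = None  # sentinel match-key, distinct from every notice string
--
--
-- def _tokens(notice):
--     """Canonical match-keys of a notice: the notice itself, plus the score token
--     if the notice is score-related (FCRA 609(f))."""
--     keys = {notice}
--     if any(kw in notice for kw in _SCORE_KEYWORDS):
--         keys.add(_SCORE_TOKEN)
--     return keys
--
--
-- def _notice_matches(required: str, received_set: set[str]) -> bool:
--     """Check if a required notice is satisfied by any received notice."""
--     index = set()
--     for received in received_set:
--         index |= _tokens(received)
--     return not _tokens(required).isdisjoint(index)
-- ===== Notes on version B (the rewrite author's own statement) =====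
-- stated objective: alternative
-- what changed: Replaces A's fused per-element loop with early returns by a canonicalization scheme: every notice maps to a set of match-keys (the notice itself plus a score sentinel when score-related), the received notices are folded into one key index, and the answer is non-disjointness of required's key set with that index.
import Mathlib
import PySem

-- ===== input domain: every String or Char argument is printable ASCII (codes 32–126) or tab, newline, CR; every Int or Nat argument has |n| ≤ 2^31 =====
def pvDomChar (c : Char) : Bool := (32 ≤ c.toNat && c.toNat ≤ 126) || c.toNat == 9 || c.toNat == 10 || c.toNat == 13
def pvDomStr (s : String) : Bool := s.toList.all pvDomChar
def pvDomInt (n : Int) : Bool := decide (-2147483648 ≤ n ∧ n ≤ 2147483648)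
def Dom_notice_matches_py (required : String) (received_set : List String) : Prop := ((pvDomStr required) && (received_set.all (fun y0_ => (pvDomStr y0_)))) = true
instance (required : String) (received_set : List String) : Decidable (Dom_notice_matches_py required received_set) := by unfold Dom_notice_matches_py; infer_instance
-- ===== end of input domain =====

-- B replaces A's fused per-element loop (with early returns) by canonicalization: each
-- notice maps to a set of match-keys (itself + a score sentinel when score-related), the
-- received notices are folded into one key index, and the answer is non-disjointness.

-- module constant _SCORE_KEYWORDS (shared by both Pythons)
def scoreKeywords : List String := ["credit score", "score disclosure", "score used"]

-- ===== PORT A =====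
-- the for-loop of A, with its early returns, as structural recursion
def noticeLoopA (required : String) : List String → Bool
  | [] => false
  | received :: rest =>
    if required == received then true
    else if scoreKeywords.any (fun kw => PySem.Str.isIn kw required) then
      if scoreKeywords.any (fun kw => PySem.Str.isIn kw received) then true
      else noticeLoopA required rest
    else noticeLoopA required rest

def notice_matches_py (required : String) (received_set : List String) : Bool :=
  noticeLoopA required received_set

-- ===== PORT B =====
-- _tokens: match-keys of a notice; the sentinel _SCORE_TOKEN = None is `none`
def bTokens (notice : String) : PySem.Set (Option String) :=
  let keys : PySem.Set (Option String) := PySem.Set.add PySem.Set.empty (some notice)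
  if scoreKeywords.any (fun kw => PySem.Str.isIn kw notice) then
    PySem.Set.add keys none
  else keys

def notice_matches_py_alt (required : String) (received_set : List String) : Bool :=
  let index : PySem.Set (Option String) :=
    received_set.foldl (fun index received => PySem.Set.union index (bTokens received))
      PySem.Set.empty
  !(PySem.Set.isdisjoint (bTokens required) index)

-- ===== PRECONDITION & SPEC =====
def Spec_notice_matches_py (required : String) (received_set : List String) (out : Bool) : Prop := out = notice_matches_py_alt required received_set
instance (required : String) (received_set : List String) (out : Bool) : Decidable (Spec_notice_matches_py required received_set out) := by unfold Spec_notice_matches_py; infer_instance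

-- ===== CLAIM (what is proved, stated in full; the proofs are below) =====
def Claim_equal_notice_matches_py : Prop := ∀ (required : String) (received_set : List String), Dom_notice_matches_py required received_set → Spec_notice_matches_py required received_set (notice_matches_py required received_set)

-- ===== LEMMAS AND PROOFS =====

-- A's loop computes "required is a member, or (required is score-related and some element is)"
theorem noticeLoopA_eq (required : String) (rs : List String) :
    noticeLoopA required rs =
      (rs.contains required ||
        (scoreKeywords.any (fun kw => PySem.Str.isIn kw required) &&
          rs.any (fun received => scoreKeywords.any (fun kw => PySem.Str.isIn kw received)))) := by
  induction rs with
  | nil => simp [noticeLoopA]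
  | cons r rest ih =>
    simp only [noticeLoopA, List.contains_cons, List.any_cons, ih]
    cases required == r <;>
      cases scoreKeywords.any (fun kw => PySem.Str.isIn kw required) <;>
        cases scoreKeywords.any (fun kw => PySem.Str.isIn kw r) <;>
          cases rest.contains required <;>
            cases rest.any (fun received => scoreKeywords.any (fun kw => PySem.Str.isIn kw received)) <;>
              rfl

theorem mem_bTokens (x : Option String) (s : String) :
    x ∈ bTokens s ↔
      x = some s ∨ (x = none ∧ scoreKeywords.any (fun kw => PySem.Str.isIn kw s) = true) := by
  unfold bTokens
  split <;> rename_i h <;>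
    simp_all [PySem.Set.mem_add, PySem.Set.empty]

theorem mem_bIndex (x : Option String) (rs : List String) (init : PySem.Set (Option String)) :
    x ∈ rs.foldl (fun index received => PySem.Set.union index (bTokens received)) init ↔
      x ∈ init ∨ ∃ r ∈ rs, x ∈ bTokens r := by
  induction rs generalizing init with
  | nil => simp
  | cons r rest ih =>
    simp only [List.foldl_cons, ih, PySem.Set.mem_union, List.mem_cons]
    constructor
    · rintro ((h | h) | ⟨r', hr', h⟩)
      · exact Or.inl h
      · exact Or.inr ⟨r, Or.inl rfl, h⟩
      · exact Or.inr ⟨r', Or.inr hr', h⟩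
    · rintro (h | ⟨r', (rfl | hr'), h⟩)
      · exact Or.inl (Or.inl h)
      · exact Or.inl (Or.inr h)
      · exact Or.inr ⟨r', hr', h⟩

-- ===== VERDICT (by name: the statement is the Claim_ definition above) =====
theorem notice_matches_py_spec : Claim_equal_notice_matches_py := by
  intro required rs _
  unfold Spec_notice_matches_py notice_matches_py notice_matches_py_alt
  rw [noticeLoopA_eq]
  rw [Bool.eq_iff_iff]
  simp only [Bool.or_eq_true, Bool.and_eq_true, List.contains_iff_mem, List.any_eq_true,
    Bool.not_eq_true', ← Bool.not_eq_true, PySem.Set.isdisjoint_iff]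
  push_neg
  constructor
  · rintro (hmem | ⟨hreq, r, hr, hscore⟩)
    · exact ⟨some required, (mem_bTokens _ _).mpr (Or.inl rfl),
        (mem_bIndex _ _ _).mpr (Or.inr ⟨required, hmem, (mem_bTokens _ _).mpr (Or.inl rfl)⟩)⟩
    · exact ⟨none, (mem_bTokens _ _).mpr (Or.inr ⟨rfl, List.any_eq_true.mpr hreq⟩),
        (mem_bIndex _ _ _).mpr (Or.inr ⟨r, hr, (mem_bTokens _ _).mpr (Or.inr ⟨rfl, List.any_eq_true.mpr hscore⟩)⟩)⟩
  · rintro ⟨x, hx, hidx⟩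
    rcases (mem_bIndex _ _ _).mp hidx with h | ⟨r, hr, hxr⟩
    · simp [PySem.Set.empty] at h
    · rcases (mem_bTokens _ _).mp hx with rfl | ⟨rfl, hreq⟩
      · rcases (mem_bTokens _ _).mp hxr with h | ⟨h, _⟩
        · obtain rfl := Option.some.inj h; exact Or.inl hr
        · exact absurd h (by simp)
      · rcases (mem_bTokens _ _).mp hxr with h | ⟨_, hscore⟩
        · exact absurd h (by simp)
        · exact Or.inr ⟨List.any_eq_true.mp hreq, r, hr, List.any_eq_true.mp hscore⟩
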